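-- pv_equiv track=rewrite | github.com/kraemer-lab/GRAPEVNE | backend/parser/TokenizeFile.py | GetMembershipFromList
-- ===== SOURCE A (Python) =====
-- def GetMembershipFromList(blocks):
--     '''Return membership indices indicating which block each line belongs to'''
--     index = 0
--     lastblock = 0
--     block_membership = blocks  # populate vector
--     for ix, block in enumerate(blocks):
--         if block != lastblock:
--             index += 1
--             lastblock = block
--         block_membership[ix] = index
--     return block_membership
-- ===== SOURCE B (Python) =====
-- from itertools import accumulate
--
-- def GetMembershipFromList(blocks):
--     '''Return membership indices indicating which block each line belongs to'''
--     orig = list(blocks)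
--     flags = [1 if x != (orig[i - 1] if i > 0 else 0) else 0 for i, x in enumerate(orig)]
--     blocks[:] = list(accumulate(flags))
--     return blocks
-- ===== Notes on version B (the rewrite author's own statement) =====
-- stated objective: alternative
-- what changed: Replaces the stateful conditional-increment loop by a flags-then-prefix-sum decomposition: mark each position whose value differs from its predecessor (0 before the first), then itertools.accumulate gives the membership indices, written back in place.
import Mathlib
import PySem

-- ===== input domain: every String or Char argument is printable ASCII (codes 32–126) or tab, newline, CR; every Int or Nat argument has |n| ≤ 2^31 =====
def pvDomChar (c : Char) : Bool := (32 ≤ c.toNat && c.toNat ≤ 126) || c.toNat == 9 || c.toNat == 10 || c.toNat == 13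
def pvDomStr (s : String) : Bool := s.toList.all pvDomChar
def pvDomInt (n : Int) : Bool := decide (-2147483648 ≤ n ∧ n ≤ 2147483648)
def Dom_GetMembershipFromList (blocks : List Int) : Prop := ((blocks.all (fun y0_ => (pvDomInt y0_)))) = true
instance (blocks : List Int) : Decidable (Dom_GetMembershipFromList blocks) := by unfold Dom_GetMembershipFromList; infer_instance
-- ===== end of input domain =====

-- B replaces A's stateful conditional-increment loop by change-flags plus a running prefix sum (same cost, different decomposition); A mutates its argument in place, equivalence here is about the return value.
-- ===== PORT A =====
-- loop over enumerate(blocks) with state (index, lastblock), writing index at each position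
def pvAloop (bs : List Int) (index lastblock : Int) : List Int :=
  match bs with
  | [] => []
  | b :: rest =>
      if b != lastblock then (index + 1) :: pvAloop rest (index + 1) b
      else index :: pvAloop rest index lastblock

def GetMembershipFromList (blocks : List Int) : List Int :=
  pvAloop blocks 0 0

-- ===== PORT B =====
-- flag[i] = 1 if orig[i] != predecessor (0 for the first) else 0
def pvFlags (orig : List Int) : List Int :=
  List.zipWith (fun x p => if x != p then (1 : Int) else 0) orig (0 :: orig)

-- itertools.accumulate: running sums
def pvAccum (acc : Int) (fs : List Int) : List Int :=
  match fs with
  | [] => []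
  | f :: rest => (acc + f) :: pvAccum (acc + f) rest

def GetMembershipFromList_alt (blocks : List Int) : List Int :=
  pvAccum 0 (pvFlags blocks)

-- ===== PRECONDITION & SPEC =====
def Spec_GetMembershipFromList (blocks : List Int) (out : List Int) : Prop := out = GetMembershipFromList_alt blocks
instance (blocks : List Int) (out : List Int) : Decidable (Spec_GetMembershipFromList blocks out) := by unfold Spec_GetMembershipFromList; infer_instance

-- ===== CLAIM (what is proved, stated in full; the proofs are below) =====
def Claim_equal_GetMembershipFromList : Prop := ∀ (blocks : List Int), Dom_GetMembershipFromList blocks → Spec_GetMembershipFromList blocks (GetMembershipFromList blocks)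

-- ===== LEMMAS AND PROOFS =====

lemma pvAloop_eq_accum (bs : List Int) (index lastblock : Int) :
    pvAloop bs index lastblock
      = pvAccum index (List.zipWith (fun x p => if x != p then (1 : Int) else 0) bs (lastblock :: bs)) := by
  induction bs generalizing index lastblock with
  | nil => rfl
  | cons b rest ih =>
      by_cases h : b = lastblock
      · subst h
        simp [pvAloop, pvAccum, ih]
      · simp [pvAloop, pvAccum, h, ih]

-- ===== VERDICT (by name: the statement is the Claim_ definition above) =====
theorem GetMembershipFromList_spec : Claim_equal_GetMembershipFromList := by
  intro blocks _
  show GetMembershipFromList blocks = GetMembershipFromList_alt blocks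
  simpa [GetMembershipFromList, GetMembershipFromList_alt, pvFlags] using
    pvAloop_eq_accum blocks 0 0
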